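-- pv_equiv track=rewrite | github.com/loudsheep/matura | informatyka/zbiur_zadan/rozw/78/3.py | skrot
-- ===== SOURCE A (Python) =====
-- def skrot(wiadomosc):
--     S = [ord(i) for i in "ALGORYTM"]
--     while len(wiadomosc) % 8 != 0:
--         wiadomosc += "."
--
--     for i in range(0, len(wiadomosc), 8):
--         partition = wiadomosc[i:i+8]
--         for j in range(8):
--             S[j] = (S[j] + ord(partition[j])) % 128
--
--     wynik = ""
--     for j in range(8):
--         wynik = wynik + chr(65 + S[j] % 26)
--
--     return wynik
-- ===== SOURCE B (Python) =====
-- def skrot(wiadomosc):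
--     padded = wiadomosc + "." * ((8 - len(wiadomosc) % 8) % 8)
--     wynik = []
--     for j, base in enumerate("ALGORYTM"):
--         total = ord(base) + sum(ord(padded[k]) for k in range(j, len(padded), 8))
--         wynik.append(chr(65 + (total % 128) % 26))
--     return "".join(wynik)
-- ===== Notes on version B (the rewrite author's own statement) =====
-- stated objective: alternative
-- what changed: B replaces A's block-by-block loop updating a persistent 8-element state array (with a modulo at every step) by a column-major traversal: for each of the 8 output positions it sums the character codes of that column in one pass, padding computed arithmetically instead of a while-loop, and applies the modulo once at the end.
import Mathlib
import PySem

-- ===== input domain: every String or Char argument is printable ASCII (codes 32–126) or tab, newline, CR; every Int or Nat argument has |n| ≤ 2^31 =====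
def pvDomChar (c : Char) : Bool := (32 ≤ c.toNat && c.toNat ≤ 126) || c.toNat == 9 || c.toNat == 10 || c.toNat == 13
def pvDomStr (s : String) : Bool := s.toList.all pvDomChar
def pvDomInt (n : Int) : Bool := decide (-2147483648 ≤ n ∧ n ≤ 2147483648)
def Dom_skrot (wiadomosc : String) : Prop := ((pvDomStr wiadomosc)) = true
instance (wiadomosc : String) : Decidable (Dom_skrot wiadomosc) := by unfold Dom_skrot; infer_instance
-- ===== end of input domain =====

-- B replaces A's block-by-block loop over a persistent 8-element state array by a
-- column-major pass per output position with a single final modulo (objective: alternative).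

-- ===== PORT A =====
-- Python's `while len(wiadomosc) % 8 != 0: wiadomosc += "."`
def padA (w : List Char) : List Char :=
  if w.length % 8 ≠ 0 then padA (w ++ ['.']) else w
termination_by (8 - w.length % 8) % 8
decreasing_by simp [List.length_append]; omega

-- inner `for j in range(8): S[j] = (S[j] + ord(partition[j])) % 128`
def innerA (S : List Nat) (part : List Char) : List Nat :=
  (PySem.List.pyRange 0 8 1).foldl
    (fun S j => S.set j.toNat ((S.getD j.toNat 0 + (part.getD j.toNat ' ').toNat) % 128)) S

-- outer `for i in range(0, len(wiadomosc), 8): partition = wiadomosc[i:i+8]; …`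
def outerA (w : List Char) (S : List Nat) : List Nat :=
  (PySem.List.pyRange 0 (w.length : Int) 8).foldl
    (fun S i => innerA S (PySem.List.slice w (some i) (some (i + 8)))) S

def skrot (wiadomosc : String) : String :=
  let w := padA wiadomosc.toList
  let S := outerA w ("ALGORYTM".toList.map Char.toNat)
  String.mk ((PySem.List.pyRange 0 8 1).foldl
    (fun acc j => acc ++ [Char.ofNat (65 + (S.getD j.toNat 0) % 26)]) [])

-- ===== PORT B =====
-- `sum(ord(padded[k]) for k in range(j, len(padded), 8))`
def colSumB (padded : List Char) (j : Nat) : Nat :=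
  (PySem.List.pyRange (j : Int) (padded.length : Int) 8).foldl
    (fun t k => t + (padded.getD k.toNat ' ').toNat) 0

def skrot_alt (wiadomosc : String) : String :=
  let padded := wiadomosc.toList ++ List.replicate ((8 - wiadomosc.toList.length % 8) % 8) '.'
  String.mk ("ALGORYTM".toList.zipIdx.map
    (fun cj => Char.ofNat (65 + ((cj.1.toNat + colSumB padded cj.2) % 128) % 26)))

-- ===== PRECONDITION & SPEC =====
def Spec_skrot (wiadomosc : String) (out : String) : Prop := out = skrot_alt wiadomosc
instance (wiadomosc : String) (out : String) : Decidable (Spec_skrot wiadomosc out) := by unfold Spec_skrot; infer_instance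

-- ===== CLAIM (what is proved, stated in full; the proofs are below) =====
def Claim_equal_skrot : Prop := ∀ (wiadomosc : String), Dom_skrot wiadomosc → Spec_skrot wiadomosc (skrot wiadomosc)

-- ===== LEMMAS AND PROOFS =====

-- the padding while-loop in closed form
theorem padA_eq (w : List Char) :
    padA w = w ++ List.replicate ((8 - w.length % 8) % 8) '.' := by
  fun_induction padA w with
  | case1 w h ih =>
    rw [ih]
    simp only [List.length_append, List.append_assoc, List.singleton_append]
    congr 1
    have : (8 - (w.length + 1) % 8) % 8 + 1 = (8 - w.length % 8) % 8 := by omega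
    rw [← this, List.replicate_succ]
    simp
  | case2 w h => simp at h; simp [h]

-- range(j, 8*m, 8) in closed form
theorem pyRange8_eq (j m : Nat) (hj : j < 8) :
    PySem.List.pyRange (j : Int) ((8 * m : Nat) : Int) 8
      = (List.range m).map (fun k : Nat => (j : Int) + 8 * (k : Int)) := by
  rw [PySem.List.pyRange_of_pos _ _ (by norm_num)]
  by_cases h : (j : Int) < ((8 * m : Nat) : Int)
  · rw [if_pos h]
    have hc : (((8 * m : Nat) : Int) - j + 8 - 1) / 8 = (m : Int) := by
      have h2 : ((8 * m : Nat) : Int) - j + 8 - 1 = (7 - j) + m * 8 := by push_cast; ring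
      rw [h2, Int.add_mul_ediv_right _ _ (by norm_num : (8:Int) ≠ 0),
          Int.ediv_eq_zero_of_lt (by omega) (by omega)]
      simp
    rw [hc, Int.toNat_natCast]
  · rw [if_neg h]
    have hm : m = 0 := by push_cast at h; omega
    simp [hm]

theorem innerA_eval (a0 a1 a2 a3 a4 a5 a6 a7 : Nat) (p : List Char) :
    innerA [a0, a1, a2, a3, a4, a5, a6, a7] p
      = [(a0 + (p.getD 0 ' ').toNat) % 128, (a1 + (p.getD 1 ' ').toNat) % 128,
         (a2 + (p.getD 2 ' ').toNat) % 128, (a3 + (p.getD 3 ' ').toNat) % 128,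
         (a4 + (p.getD 4 ' ').toNat) % 128, (a5 + (p.getD 5 ' ').toNat) % 128,
         (a6 + (p.getD 6 ' ').toNat) % 128, (a7 + (p.getD 7 ' ').toNat) % 128] := by
  have h : PySem.List.pyRange 0 8 1 = [0,1,2,3,4,5,6,7] := by decide
  simp [innerA, h, List.foldl, List.set, List.getD]

theorem getD_take_drop (w : List Char) (i j : Nat) (hj : j < 8) :
    ((w.drop i).take 8).getD j ' ' = w.getD (i + j) ' ' := by
  simp [List.getD, hj, List.getElem?_drop]

-- sum of the column j over the first m blocks of w
def csum (w : List Char) (j m : Nat) : Nat :=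
  ((List.range m).map (fun k => (w.getD (j + 8 * k) ' ').toNat)).sum

-- A's outer fold in closed form (the 8 column sums, mod 128)
theorem fold_blocks (w : List Char) (m : Nat) (hm : 8 * m ≤ w.length)
    (a0 a1 a2 a3 a4 a5 a6 a7 : Nat)
    (h0 : a0 < 128) (h1 : a1 < 128) (h2 : a2 < 128) (h3 : a3 < 128)
    (h4 : a4 < 128) (h5 : a5 < 128) (h6 : a6 < 128) (h7 : a7 < 128) :
    ((List.range m).map (fun k : Nat => ((0 : Int) + 8 * (k : Int)))).foldl
        (fun S i => innerA S (PySem.List.slice w (some i) (some (i + 8))))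
        [a0, a1, a2, a3, a4, a5, a6, a7]
      = [(a0 + csum w 0 m) % 128, (a1 + csum w 1 m) % 128, (a2 + csum w 2 m) % 128,
         (a3 + csum w 3 m) % 128, (a4 + csum w 4 m) % 128, (a5 + csum w 5 m) % 128,
         (a6 + csum w 6 m) % 128, (a7 + csum w 7 m) % 128] := by
  induction m with
  | zero =>
    simp [csum, Nat.mod_eq_of_lt, h0, h1, h2, h3, h4, h5, h6, h7]
  | succ m ih =>
    rw [List.range_succ, List.map_append, List.foldl_append, ih (by omega)]
    simp only [List.map_cons, List.map_nil, List.foldl_cons, List.foldl_nil]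
    have hsl : PySem.List.slice w (some ((0:Int) + 8 * (m:Nat))) (some ((0:Int) + 8 * (m:Nat) + 8))
        = (w.drop (8*m)).take 8 := by
      have h1 : ((0:Int) + 8 * (m:Nat)) = ((8*m : Nat) : Int) := by push_cast; ring
      rw [h1]
      have h2 : ((8*m : Nat) : Int) + 8 = ((8*m : Nat) : Int) + ((8:Nat) : Int) := by norm_num
      rw [h2, PySem.List.slice_natCast_add]
    rw [hsl, innerA_eval]
    have hcs : ∀ j, csum w j (m+1) = csum w j m + (w.getD (j + 8 * m) ' ').toNat := by
      intro j; simp [csum, List.range_succ]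
    simp only [getD_take_drop w (8*m) 0 (by omega), getD_take_drop w (8*m) 1 (by omega),
      getD_take_drop w (8*m) 2 (by omega), getD_take_drop w (8*m) 3 (by omega),
      getD_take_drop w (8*m) 4 (by omega), getD_take_drop w (8*m) 5 (by omega),
      getD_take_drop w (8*m) 6 (by omega), getD_take_drop w (8*m) 7 (by omega),
      Nat.mod_add_mod, hcs]
    simp [Nat.add_comm, Nat.add_assoc]

-- B's column sum equals csum
theorem colSumB_eq (w : List Char) (m j : Nat) (hw : w.length = 8 * m) (hj : j < 8) :
    colSumB w j = csum w j m := by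
  unfold colSumB csum
  rw [hw, pyRange8_eq j m hj, List.foldl_map, PySem.List.foldl_add_nat]
  simp only [Nat.zero_add]
  apply congrArg
  apply List.map_congr_left
  intro k _
  congr 1

-- ===== VERDICT (by name: the statement is the Claim_ definition above) =====
theorem skrot_spec : Claim_equal_skrot := by
  unfold Claim_equal_skrot Spec_skrot
  intro s _
  simp only [skrot, skrot_alt]
  rw [padA_eq]
  set padded := s.toList ++ List.replicate ((8 - s.toList.length % 8) % 8) '.' with hp
  have hm : padded.length = 8 * (padded.length / 8) := by
    simp only [hp, List.length_append, List.length_replicate]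
    omega
  simp only [outerA]
  rw [show ("ALGORYTM".toList.map Char.toNat) = [65,76,71,79,82,89,84,77] from rfl]
  rw [show ((padded.length : Int)) = (((8 * (padded.length / 8) : Nat)) : Int) by rw [← hm]]
  rw [show ((0:Int) = ((0:Nat):Int)) from rfl, pyRange8_eq 0 (padded.length / 8) (by omega)]
  simp only [Nat.cast_zero]
  rw [fold_blocks padded (padded.length / 8) (by omega) 65 76 71 79 82 89 84 77
      (by omega) (by omega) (by omega) (by omega) (by omega) (by omega) (by omega) (by omega)]
  rw [show "ALGORYTM".toList.zipIdx
      = [('A',0),('L',1),('G',2),('O',3),('R',4),('Y',5),('T',6),('M',7)] from rfl]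
  simp only [List.map_cons, List.map_nil]
  rw [colSumB_eq padded (padded.length / 8) 0 hm (by omega),
      colSumB_eq padded (padded.length / 8) 1 hm (by omega),
      colSumB_eq padded (padded.length / 8) 2 hm (by omega),
      colSumB_eq padded (padded.length / 8) 3 hm (by omega),
      colSumB_eq padded (padded.length / 8) 4 hm (by omega),
      colSumB_eq padded (padded.length / 8) 5 hm (by omega),
      colSumB_eq padded (padded.length / 8) 6 hm (by omega),
      colSumB_eq padded (padded.length / 8) 7 hm (by omega)]
  rfl
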